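-- pv_equiv track=rewrite | github.com/Ishpreet39/DSA-Coding-Challenges | sum_of_palindrome.py | isDigitSumPalindrome
-- ===== SOURCE A (Python) =====
-- def isDigitSumPalindrome(n):
--     #code here
--     def calculateDigitSum(num):
--         digit_sum = 0
--         while num > 0:
--             digit_sum += num % 10
--             num //= 10
--         return digit_sum
--
--     # Function to check if a number is a palindrome
--     def isPalindrome(number):
--         return str(number) == str(number)[::-1]
--
--     digit_sum = calculateDigitSum(n)
--     return int(isPalindrome(digit_sum))
-- ===== SOURCE B (Python) =====
-- def isDigitSumPalindrome(n):
--     # Flat arithmetic version: digit sum, then numeric reversal (no strings).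
--     s = 0
--     while n > 0:
--         s += n % 10
--         n //= 10
--     rev, t = 0, s
--     while t > 0:
--         rev = rev * 10 + t % 10
--         t //= 10
--     return int(s == rev)
-- ===== Notes on version B (the rewrite author's own statement) =====
-- stated objective: alternative
-- what changed: Replaces the string-based palindrome test (str(d)==str(d)[::-1]) with a purely arithmetic numeric-reversal loop, flattening the two nested helpers into one function with no string conversion.
import Mathlib
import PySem

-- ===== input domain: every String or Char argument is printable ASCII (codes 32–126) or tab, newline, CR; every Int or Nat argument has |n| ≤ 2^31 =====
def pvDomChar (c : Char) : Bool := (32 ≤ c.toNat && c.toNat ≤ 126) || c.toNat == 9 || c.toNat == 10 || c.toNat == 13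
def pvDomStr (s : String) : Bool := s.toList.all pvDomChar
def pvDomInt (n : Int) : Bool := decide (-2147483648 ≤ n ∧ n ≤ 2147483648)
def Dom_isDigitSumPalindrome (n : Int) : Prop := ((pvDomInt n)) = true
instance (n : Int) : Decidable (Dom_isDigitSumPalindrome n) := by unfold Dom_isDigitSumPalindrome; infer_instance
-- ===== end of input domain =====

-- B changes the palindrome test from string reversal to an arithmetic numeric-reversal loop (objective: alternative, same cost).

-- ===== PORT A =====
-- A's helper calculateDigitSum: while num > 0: digit_sum += num % 10; num //= 10
def pvCalcDigitSumA (num digit_sum : Int) : Int :=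
  if num > 0 then
    pvCalcDigitSumA (PySem.Int.floordiv num 10) (digit_sum + PySem.Int.mod num 10)
  else digit_sum
termination_by num.toNat
decreasing_by
  rw [PySem.Int.floordiv_eq_ediv_of_pos (by omega : (0:Int) < 10)]; omega

-- A's helper isPalindrome: str(number) == str(number)[::-1]
def pvIsPalindromeA (number : Int) : Bool :=
  some (PySem.Int.toStr number) == PySem.Str.slice? (PySem.Int.toStr number) none none (-1)

def isDigitSumPalindrome (n : Int) : Int :=
  let digit_sum := pvCalcDigitSumA n 0
  if pvIsPalindromeA digit_sum then 1 else 0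

-- ===== PORT B =====
-- B's first loop: s += n % 10; n //= 10 while n > 0
def pvDigitSumB (n s : Int) : Int :=
  if n > 0 then
    pvDigitSumB (PySem.Int.floordiv n 10) (s + PySem.Int.mod n 10)
  else s
termination_by n.toNat
decreasing_by
  rw [PySem.Int.floordiv_eq_ediv_of_pos (by omega : (0:Int) < 10)]; omega

-- B's second loop: rev = rev*10 + t%10; t //= 10 while t > 0.
-- Fuel t.toNat+1 only makes the recursion structural; t strictly decreases each
-- iteration (t//10 < t for t > 0), so the fuel is never exhausted.
def pvRevBAux : Nat → Int → Int → Int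
  | 0, _, rev => rev
  | f + 1, t, rev =>
    if t > 0 then
      pvRevBAux f (PySem.Int.floordiv t 10) (rev * 10 + PySem.Int.mod t 10)
    else rev

def pvRevB (t rev : Int) : Int := pvRevBAux (t.toNat + 1) t rev

def isDigitSumPalindrome_alt (n : Int) : Int :=
  let s := pvDigitSumB n 0
  let rev := pvRevB s 0
  if s == rev then 1 else 0

-- ===== PRECONDITION & SPEC =====
def Spec_isDigitSumPalindrome (n : Int) (out : Int) : Prop := out = isDigitSumPalindrome_alt n
instance (n : Int) (out : Int) : Decidable (Spec_isDigitSumPalindrome n out) := by unfold Spec_isDigitSumPalindrome; infer_instance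

-- ===== CLAIM (what is proved, stated in full; the proofs are below) =====
def Claim_equal_isDigitSumPalindrome : Prop := ∀ (n : Int), Dom_isDigitSumPalindrome n → Spec_isDigitSumPalindrome n (isDigitSumPalindrome n)

-- ===== LEMMAS AND PROOFS =====

-- The two digit-sum loops are identical transcriptions, hence equal.
theorem ds_eq (num acc : Int) : pvCalcDigitSumA num acc = pvDigitSumB num acc := by
  fun_induction pvCalcDigitSumA num acc with
  | case1 num acc h ih =>
    rw [ih]; conv_rhs => rw [pvDigitSumB]
    rw [if_pos h]
  | case2 num acc h => rw [pvDigitSumB]; simp [h]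

-- Digit-sum bound: with at most k digits, the sum grows by at most 9k and stays ≥ acc.
theorem ds_bounds (k : Nat) : ∀ num acc : Int, num < 10 ^ k →
    acc ≤ pvCalcDigitSumA num acc ∧ pvCalcDigitSumA num acc ≤ acc + 9 * k := by
  induction k with
  | zero =>
    intro num acc h
    rw [pvCalcDigitSumA]
    have : ¬ num > 0 := by simpa using by omega
    simp [this]
  | succ k ih =>
    intro num acc h
    rw [pvCalcDigitSumA]
    by_cases hp : num > 0
    · simp only [hp, if_pos]
      have hm : PySem.Int.mod num 10 = num % 10 :=
        PySem.Int.mod_eq_emod_of_pos (by omega)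
      have hd : PySem.Int.floordiv num 10 = num / 10 :=
        PySem.Int.floordiv_eq_ediv_of_pos (by omega)
      have hlt : num / 10 < 10 ^ k := by
        have : (10:Int) ^ (k+1) = 10 ^ k * 10 := by ring
        omega
      have h0 : 0 ≤ PySem.Int.mod num 10 := by rw [hm]; omega
      have h9 : PySem.Int.mod num 10 < 10 := by rw [hm]; omega
      have := ih (PySem.Int.floordiv num 10) (acc + PySem.Int.mod num 10) (by rw [hd]; exact hlt)
      push_cast; push_cast at this; omega
    · simp [hp]; omega

-- The two palindrome tests agree on every possible digit sum (0 ≤ d ≤ 90): checked by decide.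
theorem pal_eq_small : ∀ m : Nat, m < 91 →
    ((if pvIsPalindromeA (m : Int) then (1:Int) else 0) =
      (if (m : Int) == pvRevB (m : Int) 0 then (1:Int) else 0)) := by decide

-- ===== VERDICT (by name: the statement is the Claim_ definition above) =====
theorem isDigitSumPalindrome_spec : Claim_equal_isDigitSumPalindrome := by
  intro n hdom
  unfold Spec_isDigitSumPalindrome isDigitSumPalindrome isDigitSumPalindrome_alt
  have hn : n < 10 ^ 10 := by
    unfold Dom_isDigitSumPalindrome pvDomInt at hdom
    simp at hdom; omega
  have hb := ds_bounds 10 n 0 hn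
  rw [← ds_eq]
  set d := pvCalcDigitSumA n 0 with hd
  have hdn : d = ((d.toNat : Nat) : Int) := by omega
  have hlt : d.toNat < 91 := by omega
  have := pal_eq_small d.toNat hlt
  rw [← hdn] at this
  simpa using this
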